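-- pv_equiv track=rewrite | github.com/ansible/ansible | lib/ansible/modules/async_wrapper.py | _filter_non_json_lines
-- ===== SOURCE A (Python) =====
-- def _filter_non_json_lines(data):
--     '''
--     Used to filter unrelated output around module JSON output, like messages from
--     tcagetattr, or where dropbear spews MOTD on every single command (which is nuts).
--
--     Filters leading lines before first line-starting occurrence of '{', and filter all
--     trailing lines after matching close character (working from the bottom of output).
--     '''
--     warnings = []
--
--     # Filter initial junk
--     lines = data.splitlines()
--
--     for start, line in enumerate(lines):
--         line = line.strip()
--         if line.startswith(u'{'):
--             break
--     else:
--         raise ValueError('No start of json char found')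
--
--     # Filter trailing junk
--     lines = lines[start:]
--
--     for reverse_end_offset, line in enumerate(reversed(lines)):
--         if line.strip().endswith(u'}'):
--             break
--     else:
--         raise ValueError('No end of json char found')
--
--     if reverse_end_offset > 0:
--         # Trailing junk is uncommon and can point to things the user might
--         # want to change.  So print a warning if we find any
--         trailing_junk = lines[len(lines) - reverse_end_offset:]
--         warnings.append('Module invocation had junk after the JSON data: %s' % '\n'.join(trailing_junk))
--
--     lines = lines[:(len(lines) - reverse_end_offset)]
--
--     return ('\n'.join(lines), warnings)
-- ===== SOURCE B (Python) =====
-- def _filter_non_json_lines(data):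
--     '''Single forward pass: find the first '{'-starting line and track the last
--     '}'-ending line at or after it, then slice once.'''
--     lines = data.splitlines()
--     start = None
--     last_close = None
--     for i, line in enumerate(lines):
--         stripped = line.strip()
--         if start is None:
--             if stripped.startswith(u'{'):
--                 start = i
--                 if stripped.endswith(u'}'):
--                     last_close = i
--         elif stripped.endswith(u'}'):
--             last_close = i
--     if start is None:
--         raise ValueError('No start of json char found')
--     if last_close is None:
--         raise ValueError('No end of json char found')
--     trailing = lines[last_close + 1:]
--     warnings = []
--     if trailing:
--         warnings.append('Module invocation had junk after the JSON data: %s' % '\n'.join(trailing))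
--     return ('\n'.join(lines[start:last_close + 1]), warnings)
-- ===== Notes on version B (the rewrite author's own statement) =====
-- stated objective: alternative
-- what changed: Replaces A's forward scan plus a second scan over the reversed tail (and its reverse-offset arithmetic) with a single forward pass that tracks the first '{'-starting line and the last '}'-ending line at or after it, then slices once.
import Mathlib
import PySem

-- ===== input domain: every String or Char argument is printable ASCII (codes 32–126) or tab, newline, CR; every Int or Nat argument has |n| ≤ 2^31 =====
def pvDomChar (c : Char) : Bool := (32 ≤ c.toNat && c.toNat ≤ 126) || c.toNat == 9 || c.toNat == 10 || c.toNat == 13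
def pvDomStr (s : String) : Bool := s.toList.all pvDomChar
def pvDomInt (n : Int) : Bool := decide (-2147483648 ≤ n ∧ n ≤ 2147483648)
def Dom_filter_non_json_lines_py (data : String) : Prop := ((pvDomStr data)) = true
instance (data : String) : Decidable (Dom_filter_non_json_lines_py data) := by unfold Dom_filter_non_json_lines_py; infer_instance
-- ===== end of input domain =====

-- B replaces A's forward scan plus separate reverse scan by ONE forward pass that
-- tracks both the first '{'-starting line and the last '}'-ending line (objective: alternative decomposition).

-- shared line predicates (the literal tests both Pythons perform on a line)
def pvP (l : String) : Bool := PySem.Str.startswith (PySem.Str.strip l) "{"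
def pvQ (l : String) : Bool := PySem.Str.endswith (PySem.Str.strip l) "}"
def pvMsg (s : String) : String := "Module invocation had junk after the JSON data: " ++ s

-- ===== PORT A =====
-- 'for start, line in enumerate(lines): … break / else raise'
def pvAFindStart : List String → Nat → Option Nat
  | [], _ => none
  | l :: ls, i => if pvP l then some i else pvAFindStart ls (i + 1)

-- 'for reverse_end_offset, line in enumerate(reversed(lines)): … break / else raise'
def pvAFindEnd : List String → Nat → Option Nat
  | [], _ => none
  | l :: ls, i => if pvQ l then some i else pvAFindEnd ls (i + 1)

def filter_non_json_lines_py (data : String) : String × List String :=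
  let lines := PySem.Str.splitlines data
  match pvAFindStart lines 0 with
  | none => ("", [])  -- raise ValueError('No start of json char found')  (excluded by Pre_)
  | some start =>
    let lines2 := PySem.List.slice lines (some (start : Int)) none
    match pvAFindEnd lines2.reverse 0 with
    | none => ("", [])  -- raise ValueError('No end of json char found')  (excluded by Pre_)
    | some k =>
      let warnings :=
        if 0 < k then
          [pvMsg (PySem.Str.join "\n" (PySem.List.slice lines2 (some ((lines2.length - k : Nat) : Int)) none))]
        else []
      (PySem.Str.join "\n" (PySem.List.slice lines2 none (some ((lines2.length - k : Nat) : Int))), warnings)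

-- ===== PORT B =====
-- the single forward pass: state = (start, last_close)
def pvBScan : List String → Nat → Option Nat × Option Nat → Option Nat × Option Nat
  | [], _, st => st
  | l :: ls, i, (start?, close?) =>
    match start? with
    | none =>
      if pvP l then pvBScan ls (i + 1) (some i, if pvQ l then some i else close?)
      else pvBScan ls (i + 1) (none, close?)
    | some s => pvBScan ls (i + 1) (some s, if pvQ l then some i else close?)

def filter_non_json_lines_py_alt (data : String) : String × List String :=
  let lines := PySem.Str.splitlines data
  match pvBScan lines 0 (none, none) with
  | (some s, some c) =>
    let kept := PySem.List.slice lines (some (s : Int)) (some ((c + 1 : Nat) : Int))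
    let trailing := PySem.List.slice lines (some ((c + 1 : Nat) : Int)) none
    let warnings := if trailing.isEmpty then [] else [pvMsg (PySem.Str.join "\n" trailing)]
    (PySem.Str.join "\n" kept, warnings)
  | (none, _) => ("", [])  -- raise ValueError('No start of json char found')
  | (some _, none) => ("", [])  -- raise ValueError('No end of json char found')

-- ===== PRECONDITION & SPEC =====
-- Pre_ excludes exactly the inputs on which A raises ValueError: there must be a line whose
-- stripped form starts with '{' and, at or after it, a line whose stripped form ends with '}'.
def Pre_filter_non_json_lines_py (data : String) : Prop :=
  let L := PySem.Str.splitlines data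
  ∃ i < L.length, ∃ j < L.length, i ≤ j ∧ pvP (L.getD i "") = true ∧ pvQ (L.getD j "") = true
instance (data : String) : Decidable (Pre_filter_non_json_lines_py data) := by
  unfold Pre_filter_non_json_lines_py; infer_instance

def pvWitness_filter_non_json_lines_py : String := "{}"

def Spec_filter_non_json_lines_py (data : String) (out : String × List String) : Prop :=
  out = filter_non_json_lines_py_alt data
instance (data : String) (out : String × List String) : Decidable (Spec_filter_non_json_lines_py data out) := by
  unfold Spec_filter_non_json_lines_py; infer_instance

-- ===== CLAIM (what is proved, stated in full; the proofs are below) =====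
def Claim_equal_filter_non_json_lines_py : Prop := ∀ (data : String), Dom_filter_non_json_lines_py data → Pre_filter_non_json_lines_py data → Spec_filter_non_json_lines_py data (filter_non_json_lines_py data)



-- ===== LEMMAS AND PROOFS =====

-- last index ≥ i (absolute) of a pvQ-line, accumulator style (what B's pass maintains)
def pvLastQ : List String → Nat → Option Nat → Option Nat
  | [], _, c => c
  | l :: ls, i, c => pvLastQ ls (i + 1) (if pvQ l then some i else c)

theorem pvAFindStart_none (L : List String) (i : Nat) (h : pvAFindStart L i = none) :
    ∀ l ∈ L, pvP l = false := by
  induction L generalizing i with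
  | nil => intro l hl; cases hl
  | cons x xs ih =>
    intro l hl
    unfold pvAFindStart at h
    by_cases hx : pvP x
    · simp [hx] at h
    · rcases List.mem_cons.mp hl with rfl | hl
      · simpa using hx
      · exact ih (i + 1) (by simpa [hx] using h) l hl

theorem pvAFindStart_some (L : List String) (i s : Nat) (h : pvAFindStart L i = some s) :
    ∃ pre x suf, L = pre ++ x :: suf ∧ (∀ l ∈ pre, pvP l = false) ∧ pvP x = true ∧ s = i + pre.length := by
  induction L generalizing i with
  | nil => simp [pvAFindStart] at h
  | cons x xs ih =>
    unfold pvAFindStart at h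
    by_cases hx : pvP x
    · simp [hx] at h
      exact ⟨[], x, xs, by simp, by simp, hx, by simp [h]⟩
    · rcases ih (i + 1) (by simpa [hx] using h) with ⟨pre, y, suf, hL, hpre, hy, hs⟩
      refine ⟨x :: pre, y, suf, by simp [hL], ?_, hy, by simp [hs]; omega⟩
      intro l hl
      rcases List.mem_cons.mp hl with rfl | hl
      · simpa using hx
      · exact hpre l hl

theorem pvBScan_none_prefix (pre rest : List String) (i : Nat) (c : Option Nat)
    (h : ∀ l ∈ pre, pvP l = false) :
    pvBScan (pre ++ rest) i (none, c) = pvBScan rest (i + pre.length) (none, c) := by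
  induction pre generalizing i with
  | nil => simp
  | cons x xs ih =>
    have hx : pvP x = false := h x (by simp)
    simp only [List.cons_append, pvBScan, hx, Bool.false_eq_true, if_false]
    rw [ih (i + 1) (fun l hl => h l (by simp [hl]))]
    congr 1
    simp; omega

theorem pvBScan_some (xs : List String) (i s : Nat) (c : Option Nat) :
    pvBScan xs i (some s, c) = (some s, pvLastQ xs i c) := by
  induction xs generalizing i c with
  | nil => simp [pvBScan, pvLastQ]
  | cons x t ih => simp [pvBScan, pvLastQ, ih]

theorem pvLastQ_snoc (ys : List String) (y : String) (i : Nat) (c : Option Nat) :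
    pvLastQ (ys ++ [y]) i c = if pvQ y then some (i + ys.length) else pvLastQ ys i c := by
  induction ys generalizing i c with
  | nil => simp [pvLastQ]
  | cons x t ih =>
    simp only [List.cons_append, pvLastQ, ih]
    by_cases hy : pvQ y <;> simp [hy, Nat.add_assoc, Nat.add_comm 1]

theorem pvAFindEnd_shift (xs : List String) (i : Nat) :
    pvAFindEnd xs i = (pvAFindEnd xs 0).map (· + i) := by
  induction xs generalizing i with
  | nil => simp [pvAFindEnd]
  | cons x t ih =>
    by_cases hx : pvQ x
    · simp [pvAFindEnd, hx]
    · simp only [pvAFindEnd, hx, Bool.false_eq_true, if_false]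
      rw [ih (i + 1), ih 1]
      cases pvAFindEnd t 0 with
      | none => simp
      | some k => simp; omega

theorem pvAFindEnd_bounds (xs : List String) (i k : Nat) (h : pvAFindEnd xs i = some k) :
    i ≤ k ∧ k < i + xs.length := by
  induction xs generalizing i with
  | nil => simp [pvAFindEnd] at h
  | cons x t ih =>
    unfold pvAFindEnd at h
    by_cases hx : pvQ x
    · simp [hx] at h; simp; omega
    · have := ih (i + 1) (by simpa [hx] using h)
      simp; omega

theorem pvLastQ_eq_rev (xs : List String) (i : Nat) (c : Option Nat) :
    pvLastQ xs i c =
      match pvAFindEnd xs.reverse 0 with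
      | none => c
      | some k => some (i + (xs.length - 1 - k)) := by
  induction xs using List.reverseRecOn generalizing i c with
  | nil => simp [pvLastQ, pvAFindEnd]
  | append_singleton ys y ih =>
    rw [pvLastQ_snoc]
    have hrev : (ys ++ [y]).reverse = y :: ys.reverse := by simp
    rw [hrev]
    by_cases hy : pvQ y
    · simp [pvAFindEnd, hy]
    · simp only [pvAFindEnd, hy, Bool.false_eq_true, if_false, ih]
      rw [pvAFindEnd_shift ys.reverse 1]
      cases hfind : pvAFindEnd ys.reverse 0 with
      | none => simp
      | some k => simp; omega

theorem pv_main (data : String) :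
    filter_non_json_lines_py data = filter_non_json_lines_py_alt data := by
  unfold filter_non_json_lines_py filter_non_json_lines_py_alt
  generalize PySem.Str.splitlines data = L
  cases hstart : pvAFindStart L 0 with
  | none =>
    have hall := pvAFindStart_none L 0 hstart
    have hB : pvBScan L 0 (none, none) = (none, none) := by
      have := pvBScan_none_prefix L [] 0 none hall
      simpa using this
    simp only [hstart, hB]
  | some s =>
    rcases pvAFindStart_some L 0 s hstart with ⟨pre, x, suf, rfl, hpre, hx, hs⟩
    have hs' : s = pre.length := by omega
    subst hs'
    have hdrop : (pre ++ x :: suf).drop pre.length = x :: suf := by simp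
    have hB : pvBScan (pre ++ x :: suf) 0 (none, none)
        = (some pre.length, pvLastQ (x :: suf) pre.length none) := by
      rw [pvBScan_none_prefix pre (x :: suf) 0 none hpre]
      simp only [Nat.zero_add, pvBScan, hx, if_true]
      rw [pvBScan_some]
      rfl
    simp only [hstart, hB, pvLastQ_eq_rev, PySem.List.slice_from_natCast,
      PySem.List.slice_natCast, PySem.List.slice_to_natCast, hdrop]
    cases hend : pvAFindEnd (x :: suf).reverse 0 with
    | none => rfl
    | some k =>
      have hk : k < suf.length + 1 := by
        have := pvAFindEnd_bounds (x :: suf).reverse 0 k hend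
        simpa using this.2
      have hkept : ((pre ++ x :: suf).drop pre.length).take
            (pre.length + ((x :: suf).length - 1 - k) + 1 - pre.length)
          = (x :: suf).take ((x :: suf).length - k) := by
        rw [hdrop]; congr 1; simp; omega
      have htrail : (pre ++ x :: suf).drop (pre.length + ((x :: suf).length - 1 - k) + 1)
          = (x :: suf).drop ((x :: suf).length - k) := by
        rw [show pre.length + ((x :: suf).length - 1 - k) + 1
              = pre.length + ((x :: suf).length - k) by simp; omega,
            ← List.drop_drop, hdrop]
      dsimp only
      rw [hkept, htrail]
      by_cases hk0 : 0 < k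
      · simp [hk0]
        omega
      · have h0 : k = 0 := by omega
        subst h0
        simp

-- ===== VERDICT (by name: the statement is the Claim_ definition above) =====
theorem filter_non_json_lines_py_spec : Claim_equal_filter_non_json_lines_py := by
  intro data _ _
  unfold Spec_filter_non_json_lines_py
  exact pv_main data
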